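-- pv_equiv track=rewrite | github.com/chaoling/CIS256 | lecture/code/graph2.py | min_island
-- ===== SOURCE A (Python) =====
-- from typing import List
--
-- def min_island(grid: List[List]) -> int:
--     # this is the same as connected component problem
--     # your adjacency list is bascically build on the run, aka four directions
--     # need to check boundary conditions
--     def explore(grid, r, c, visited) -> int:
--         #navigate the grid from the point(r,c), use dfs to touch every land in a connected component fashion
--         #case 0: check the boundary:
--         row = len(grid)
--         col = len(grid[0])
--         if r >= row or c >= col or r < 0 or c < 0:
--             return 0
--         #case 1: if it is a water or already visited node, just return false
--
--         if grid[r][c] == 'W' or f'{r},{c}' in visited: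
--             return 0
--
--         visited.add(f'{r},{c}')
--         size = 1  # count myself in first
--
--         for (dr, dc) in ((1, 0), (0, 1), (-1, 0), (0, -1)):
--             size += explore(grid, r+dr, c+dc, visited)
--
--         return size
--
--     #set up the way to navigate the grid
--     minSize = len(grid)*len(grid[0]) #sys.maxsize  # or the size of the grid
--     visited = set()
--     for row in range(len(grid)):
--         for col in range(len(grid[0])):
--             size = explore(grid, row, col, visited)
--             if size != 0 and size < minSize:  # why size != 0?
--                 minSize = size
--
--     return minSize
-- ===== SOURCE B (Python) =====
-- def min_island(grid):
--     # iterative flood fill with an explicit stack instead of recursive DFS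
--     rows = len(grid)
--     cols = len(grid[0])
--     minSize = rows * cols
--     visited = set()
--     for row in range(rows):
--         for col in range(cols):
--             size = 0
--             stack = [(row, col)]
--             while stack:
--                 r, c = stack.pop()
--                 if r >= rows or c >= cols or r < 0 or c < 0 \
--                         or grid[r][c] == 'W' or f'{r},{c}' in visited:
--                     continue
--                 visited.add(f'{r},{c}')
--                 size += 1
--                 stack.append((r, c - 1))
--                 stack.append((r - 1, c))
--                 stack.append((r, c + 1))
--                 stack.append((r + 1, c))
--             if size != 0 and size < minSize:
--                 minSize = size
--     return minSize
-- ===== Notes on version B (the rewrite author's own statement) =====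
-- stated objective: alternative
-- what changed: The recursive DFS helper `explore` is replaced by an iterative flood fill driven by an explicit stack (pop a cell, skip if out of range/water/visited, else mark, count and push the four neighbours); the outer double loop, shared visited set and min update are kept.
import Mathlib
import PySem

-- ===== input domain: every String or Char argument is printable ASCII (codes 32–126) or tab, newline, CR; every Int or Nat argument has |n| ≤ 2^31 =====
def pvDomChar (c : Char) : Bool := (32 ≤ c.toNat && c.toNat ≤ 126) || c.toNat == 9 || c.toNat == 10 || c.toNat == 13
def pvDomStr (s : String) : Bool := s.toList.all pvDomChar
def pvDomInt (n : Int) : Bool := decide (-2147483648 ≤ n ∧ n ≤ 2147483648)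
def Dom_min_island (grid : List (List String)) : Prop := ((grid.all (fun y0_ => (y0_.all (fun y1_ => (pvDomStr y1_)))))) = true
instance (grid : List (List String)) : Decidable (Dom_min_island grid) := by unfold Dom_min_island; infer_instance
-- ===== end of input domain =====

-- B replaces A's recursive DFS `explore` by an iterative flood fill with an explicit stack
-- (same outer double loop, same shared visited set); equivalence is about the return value.

-- shared helpers: the `f'{r},{c}'` visited key, and the list of in-grid cells (used by A's
-- fuel bound and by B's termination measure)
def keyOf (r c : Int) : String := String.ofList (PySem.Int.toChars r ++ ',' :: PySem.Int.toChars c)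

def allCells (grid : List (List String)) : List (Int × Int) :=
  (List.range grid.length).flatMap (fun i =>
    (List.range ((PySem.List.pyGet? grid 0).getD []).length).map (fun j => (Int.ofNat i, Int.ofNat j)))

-- ===== PORT A =====
-- recursive `explore`; the fuel (number of cells + 1) only bounds the recursion depth, which
-- grows only when `visited` grows, so it is never exhausted (the simulation lemma `floodB_sim`
-- below holds for any fuel exceeding the number of unvisited cells)
def exploreA (grid : List (List String)) : Nat → Int → Int → PySem.Set String → Int × PySem.Set String
  | 0, _, _, visited => (0, visited)
  | fuel + 1, r, c, visited =>
    let row : Int := grid.length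
    let col : Int := ((PySem.List.pyGet? grid 0).getD []).length
    if r ≥ row ∨ c ≥ col ∨ r < 0 ∨ c < 0 then (0, visited)
    else if (PySem.List.pyGet? ((PySem.List.pyGet? grid r).getD []) c).getD "" = "W"
            ∨ PySem.Set.contains visited (keyOf r c) = true then (0, visited)
    else
      let visited' := PySem.Set.add visited (keyOf r c)
      [((1 : Int), (0 : Int)), (0, 1), (-1, 0), (0, -1)].foldl
        (fun acc d =>
          let res := exploreA grid fuel (r + d.1) (c + d.2) acc.2
          (acc.1 + res.1, res.2))
        ((1 : Int), visited')

def min_island (grid : List (List String)) : Int :=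
  let rows : Int := grid.length
  let cols : Int := ((PySem.List.pyGet? grid 0).getD []).length
  ((PySem.List.pyRange 0 rows 1).foldl (fun st row =>
      (PySem.List.pyRange 0 cols 1).foldl (fun st col =>
        let res := exploreA grid ((allCells grid).length + 1) row col st.2
        if res.1 ≠ 0 ∧ res.1 < st.1 then (res.1, res.2) else (st.1, res.2)) st)
    ((rows * cols : Int), (PySem.Set.empty : PySem.Set String))).1

-- ===== PORT B =====
-- number of in-grid cells not yet visited: B's termination measure
def unvisB (grid : List (List String)) (visited : PySem.Set String) : Nat :=
  (allCells grid).countP (fun p => !(PySem.Set.contains visited (keyOf p.1 p.2)))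

theorem mem_allCells (grid : List (List String)) (r c : Int)
    (hr0 : 0 ≤ r) (hr : r < (grid.length : Int)) (hc0 : 0 ≤ c)
    (hc : c < (((PySem.List.pyGet? grid 0).getD []).length : Int)) :
    (r, c) ∈ allCells grid := by
  unfold allCells
  have h1 : r.toNat < grid.length := by omega
  have h2 : c.toNat < ((PySem.List.pyGet? grid 0).getD []).length := by omega
  rw [List.mem_flatMap]
  refine ⟨r.toNat, List.mem_range.2 h1, ?_⟩
  rw [List.mem_map]
  exact ⟨c.toNat, List.mem_range.2 h2, by simp only [Prod.ext_iff, Int.ofNat_eq_natCast]; constructor <;> omega⟩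

theorem countP_strict {α : Type} {l : List α} {p q : α → Bool}
    (hpq : ∀ a ∈ l, p a = true → q a = true) {x : α} (hx : x ∈ l)
    (hpx : ¬ p x = true) (hqx : q x = true) : l.countP p < l.countP q := by
  induction l with
  | nil => cases hx
  | cons a l ih =>
    rcases List.mem_cons.1 hx with rfl | hx
    · simp only [List.countP_cons, hqx, hpx, if_true, if_false, Bool.false_eq_true]
      have := List.countP_mono_left (l := l) (fun a ha => hpq a (List.mem_cons_of_mem _ ha))
      omega
    · have h1 := ih (fun a ha => hpq a (List.mem_cons_of_mem _ ha)) hx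
      simp only [List.countP_cons]
      have := hpq a (List.mem_cons_self)
      by_cases hp : p a = true
      · simp [hp, this hp]; omega
      · by_cases hq : q a = true <;> simp [hp, hq] <;> omega

theorem unvis_add_lt (grid : List (List String)) (r c : Int) (v : PySem.Set String)
    (hr0 : 0 ≤ r) (hr : r < (grid.length : Int)) (hc0 : 0 ≤ c)
    (hc : c < (((PySem.List.pyGet? grid 0).getD []).length : Int))
    (hm : ¬ PySem.Set.contains v (keyOf r c) = true) :
    unvisB grid (PySem.Set.add v (keyOf r c)) < unvisB grid v := by
  unfold unvisB
  refine countP_strict (fun p _ h => ?_) (mem_allCells grid r c hr0 hr hc0 hc) ?_ ?_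
  · simp only [Bool.not_eq_eq_eq_not, Bool.not_true, ← Bool.not_eq_true] at h ⊢
    intro hmem
    exact h ((PySem.Set.contains_iff _ _).2 ((PySem.Set.mem_add _ _ _).2 (Or.inl ((PySem.Set.contains_iff _ _).1 hmem))))
  · simp only [Bool.not_eq_eq_eq_not, Bool.not_true, Bool.not_eq_false]
    exact (PySem.Set.contains_iff _ _).2 ((PySem.Set.mem_add _ _ _).2 (Or.inr rfl))
  · simpa using hm

-- the while-loop of B: pop a cell, skip it if out of range / water / visited, else mark it,
-- count it and push its four neighbours
def floodB (grid : List (List String)) (stack : List (Int × Int))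
    (visited : PySem.Set String) (size : Int) : Int × PySem.Set String :=
  match stack with
  | [] => (size, visited)
  | (r, c) :: rest =>
    let rows : Int := grid.length
    let cols : Int := ((PySem.List.pyGet? grid 0).getD []).length
    if r ≥ rows ∨ c ≥ cols ∨ r < 0 ∨ c < 0
        ∨ (PySem.List.pyGet? ((PySem.List.pyGet? grid r).getD []) c).getD "" = "W"
        ∨ PySem.Set.contains visited (keyOf r c) = true then
      floodB grid rest visited size
    else
      floodB grid ((r + 1, c) :: (r, c + 1) :: (r - 1, c) :: (r, c - 1) :: rest)
        (PySem.Set.add visited (keyOf r c)) (size + 1)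
termination_by (unvisB grid visited, stack.length)
decreasing_by
  · exact Prod.Lex.right _ (by simp)
  · rename_i h
    rw [not_or, not_or, not_or, not_or, not_or] at h
    exact Prod.Lex.left _ _ (unvis_add_lt grid r c visited (by omega) (by omega) (by omega) (by omega) h.2.2.2.2.2)

def min_island_alt (grid : List (List String)) : Int :=
  let rows : Int := grid.length
  let cols : Int := ((PySem.List.pyGet? grid 0).getD []).length
  ((PySem.List.pyRange 0 rows 1).foldl (fun st row =>
      (PySem.List.pyRange 0 cols 1).foldl (fun st col =>
        let res := floodB grid [(row, col)] st.2 0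
        if res.1 ≠ 0 ∧ res.1 < st.1 then (res.1, res.2) else (st.1, res.2)) st)
    ((rows * cols : Int), (PySem.Set.empty : PySem.Set String))).1

-- ===== PRECONDITION & SPEC =====
-- Pre_ excludes exactly the inputs on which A raises IndexError: the empty grid
-- (len(grid[0])) and ragged grids with a row shorter than the first row (grid[r][c]).
def Pre_min_island (grid : List (List String)) : Prop :=
  grid ≠ [] ∧ ∀ row ∈ grid, ((PySem.List.pyGet? grid 0).getD []).length ≤ row.length
instance (grid : List (List String)) : Decidable (Pre_min_island grid) := by
  unfold Pre_min_island; infer_instance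

def pvWitness_min_island : List (List String) := [["W", "L"], ["L", "W"]]

def Spec_min_island (grid : List (List String)) (out : Int) : Prop := out = min_island_alt grid
instance (grid : List (List String)) (out : Int) : Decidable (Spec_min_island grid out) := by
  unfold Spec_min_island; infer_instance

-- ===== CLAIM (what is proved, stated in full; the proofs are below) =====
def Claim_equal_min_island : Prop := ∀ (grid : List (List String)), Dom_min_island grid → Pre_min_island grid → Spec_min_island grid (min_island grid)

-- ===== LEMMAS AND PROOFS =====

theorem contains_add_of_contains {v : PySem.Set String} {k k' : String}
    (h : PySem.Set.contains v k = true) :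
    PySem.Set.contains (PySem.Set.add v k') k = true :=
  (PySem.Set.contains_iff _ _).2 ((PySem.Set.mem_add _ _ _).2 (Or.inl ((PySem.Set.contains_iff _ _).1 h)))

theorem exploreA_mono (grid : List (List String)) :
    ∀ (fuel : Nat) (r c : Int) (v : PySem.Set String) (k : String),
      PySem.Set.contains v k = true →
      PySem.Set.contains (exploreA grid fuel r c v).2 k = true := by
  intro fuel
  induction fuel with
  | zero => intro r c v k h; simpa [exploreA] using h
  | succ n ih =>
    intro r c v k h
    simp only [exploreA]
    split
    · exact h
    · split
      · exact h
      · simp only [List.foldl]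
        exact ih _ _ _ _ (ih _ _ _ _ (ih _ _ _ _ (ih _ _ _ _ (contains_add_of_contains h))))

theorem unvis_mono (grid : List (List String)) {v v' : PySem.Set String}
    (h : ∀ k, PySem.Set.contains v k = true → PySem.Set.contains v' k = true) :
    unvisB grid v' ≤ unvisB grid v := by
  unfold unvisB
  refine List.countP_mono_left (fun p _ hp => ?_)
  simp only [Bool.not_eq_eq_eq_not, Bool.not_true, ← Bool.not_eq_true] at hp ⊢
  exact fun hm => hp (h _ hm)

theorem unvis_exploreA_le (grid : List (List String)) (fuel : Nat) (r c : Int)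
    (v : PySem.Set String) : unvisB grid (exploreA grid fuel r c v).2 ≤ unvisB grid v :=
  unvis_mono grid (fun k hk => exploreA_mono grid fuel r c v k hk)

-- the simulation lemma: popping (r,c) off B's stack has exactly the effect of A's
-- recursive explore(grid, r, c, visited), provided the fuel exceeds the number of
-- unvisited cells (A's recursion depth only grows when visited grows)
theorem floodB_sim (grid : List (List String)) :
    ∀ (fuel : Nat) (v : PySem.Set String) (r c s : Int) (stack : List (Int × Int)),
      unvisB grid v < fuel →
      floodB grid ((r, c) :: stack) v s
        = floodB grid stack (exploreA grid fuel r c v).2 (s + (exploreA grid fuel r c v).1) := by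
  intro fuel
  induction fuel with
  | zero => intro v r c s stack h; omega
  | succ n ih =>
    intro v r c s stack hfuel
    rw [floodB]
    by_cases hb : (r ≥ (grid.length : Int) ∨ c ≥ (((PySem.List.pyGet? grid 0).getD []).length : Int) ∨ r < 0 ∨ c < 0)
    · rw [if_pos (by tauto)]
      simp only [exploreA]
      rw [if_pos hb]
      simp
    · by_cases hw : ((PySem.List.pyGet? ((PySem.List.pyGet? grid r).getD []) c).getD "" = "W"
          ∨ PySem.Set.contains v (keyOf r c) = true)
      · rw [if_pos (by tauto)]
        simp only [exploreA]
        rw [if_neg hb, if_pos hw]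
        simp
      · rw [if_neg (by tauto)]
        simp only [exploreA]
        rw [if_neg hb, if_neg hw]
        simp only [List.foldl, add_zero, ← sub_eq_add_neg]
        rw [not_or, not_or, not_or] at hb
        have hm : ¬ PySem.Set.contains v (keyOf r c) = true := by tauto
        have h0 : unvisB grid (PySem.Set.add v (keyOf r c)) < n := by
          have hlt := unvis_add_lt grid r c v (by omega) (by omega) (by omega) (by omega) hm
          omega
        have h1 : unvisB grid (exploreA grid n (r+1) c (PySem.Set.add v (keyOf r c))).2 < n :=
          lt_of_le_of_lt (unvis_exploreA_le _ _ _ _ _) h0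
        have h2 : unvisB grid (exploreA grid n r (c+1)
            (exploreA grid n (r+1) c (PySem.Set.add v (keyOf r c))).2).2 < n :=
          lt_of_le_of_lt (unvis_exploreA_le _ _ _ _ _) h1
        have h3 : unvisB grid (exploreA grid n (r-1) c (exploreA grid n r (c+1)
            (exploreA grid n (r+1) c (PySem.Set.add v (keyOf r c))).2).2).2 < n :=
          lt_of_le_of_lt (unvis_exploreA_le _ _ _ _ _) h2
        rw [ih (PySem.Set.add v (keyOf r c)) (r+1) c (s+1) _ h0, ih _ r (c+1) _ _ h1,
          ih _ (r-1) c _ _ h2, ih _ r (c-1) _ _ h3]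
        congr 1
        omega

theorem fuel_enough (grid : List (List String)) (v : PySem.Set String) :
    unvisB grid v < (allCells grid).length + 1 :=
  Nat.lt_succ_of_le (List.countP_le_length)

theorem step_eq (grid : List (List String)) (st : Int × PySem.Set String) (row col : Int) :
    (let res := exploreA grid ((allCells grid).length + 1) row col st.2
     if res.1 ≠ 0 ∧ res.1 < st.1 then (res.1, res.2) else (st.1, res.2))
    = (let res := floodB grid [(row, col)] st.2 0
       if res.1 ≠ 0 ∧ res.1 < st.1 then (res.1, res.2) else (st.1, res.2)) := by
  rw [floodB_sim grid ((allCells grid).length + 1) st.2 row col 0 [] (fuel_enough grid st.2)]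
  rw [floodB]
  simp

-- ===== VERDICT (by name: the statement is the Claim_ definition above) =====
theorem min_island_spec : Claim_equal_min_island := by
  intro grid _ _
  unfold Spec_min_island min_island min_island_alt
  refine congrArg Prod.fst ?_
  apply List.foldl_ext
  intro st row _
  apply List.foldl_ext
  intro st' col _
  exact step_eq grid st' row col
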